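-- pv_equiv track=rewrite | github.com/whiteborr/hackulator | app/core/validators.py | sanitize_command_input
-- ===== SOURCE A (Python) =====
-- def sanitize_command_input(input_str: str) -> str:
--     """Sanitize input for command execution"""
--     if not input_str:
--         return ""
--
--     # Remove dangerous characters for command injection
--     dangerous_chars = ['|', '&', ';', '$', '`', '(', ')', '<', '>', '"', "'"]
--     sanitized = input_str
--
--     for char in dangerous_chars:
--         sanitized = sanitized.replace(char, '')
--
--     # Remove excessive whitespace
--     sanitized = ' '.join(sanitized.split())
--
--     return sanitized.strip()
-- ===== SOURCE B (Python) =====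
-- DANGEROUS_SET = set('|&;$`()<>"\'')
--
-- def sanitize_command_input(input_str: str) -> str:
--     """Sanitize input for command execution (single-pass filter)."""
--     if not input_str:
--         return ""
--     sanitized = ''.join(c for c in input_str if c not in DANGEROUS_SET)
--     return ' '.join(sanitized.split()).strip()
-- ===== Notes on version B (the rewrite author's own statement) =====
-- stated objective: alternative
-- what changed: Replaces A's eleven sequential str.replace scans (one full pass per dangerous character) by a single traversal of the input filtering against a precomputed set of the 11 dangerous characters; the whitespace normalization step is unchanged.
import Mathlib
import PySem

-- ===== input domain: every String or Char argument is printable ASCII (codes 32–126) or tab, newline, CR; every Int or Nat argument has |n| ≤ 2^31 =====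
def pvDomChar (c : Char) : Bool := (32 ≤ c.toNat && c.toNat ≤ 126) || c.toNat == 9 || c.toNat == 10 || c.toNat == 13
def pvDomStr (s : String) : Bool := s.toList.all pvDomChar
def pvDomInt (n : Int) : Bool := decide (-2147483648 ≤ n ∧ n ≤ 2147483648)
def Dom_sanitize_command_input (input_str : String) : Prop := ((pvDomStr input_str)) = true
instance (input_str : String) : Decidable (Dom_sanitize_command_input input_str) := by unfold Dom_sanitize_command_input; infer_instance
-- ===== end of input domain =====

-- ===== PORT A =====
-- B replaces A's eleven sequential .replace passes by one filtering pass; whitespace handling identical.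
def sanitize_command_input (input_str : String) : String :=
  if input_str = "" then ""
  else
    let dangerous_chars : List String := ["|", "&", ";", "$", "`", "(", ")", "<", ">", "\"", "'"]
    let sanitized := dangerous_chars.foldl (fun s ch => PySem.Str.replace s ch "") input_str
    let sanitized := PySem.Str.join " " (PySem.Str.split₀ sanitized)
    PySem.Str.strip sanitized

-- ===== PORT B =====
def pvDangerousSet : PySem.Set Char := PySem.Set.ofList "|&;$`()<>\"'".toList

def sanitize_command_input_alt (input_str : String) : String :=
  if input_str = "" then ""
  else
    let sanitized := String.ofList (input_str.toList.filter (fun c => !(PySem.Set.contains pvDangerousSet c)))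
    PySem.Str.strip (PySem.Str.join " " (PySem.Str.split₀ sanitized))

-- ===== PRECONDITION & SPEC =====
def Spec_sanitize_command_input (input_str : String) (out : String) : Prop := out = sanitize_command_input_alt input_str
instance (input_str : String) (out : String) : Decidable (Spec_sanitize_command_input input_str out) := by unfold Spec_sanitize_command_input; infer_instance

-- ===== CLAIM (what is proved, stated in full; the proofs are below) =====
def Claim_equal_sanitize_command_input : Prop := ∀ (input_str : String), Dom_sanitize_command_input input_str → Spec_sanitize_command_input input_str (sanitize_command_input input_str)

-- ===== LEMMAS AND PROOFS =====
-- replace.go with a one-char pattern and empty replacement is a filter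
theorem go_filter (d : Char) (l acc : List Char) (fuel : Nat) (h : l.length ≤ fuel) :
    PySem.Chars.replace.go [d] [] fuel l acc = acc.reverse ++ l.filter (fun c => !(c == d)) := by
  induction l generalizing acc fuel with
  | nil => cases fuel <;> simp [PySem.Chars.replace.go]
  | cons c t ih =>
    cases fuel with
    | zero => simp at h
    | succ n =>
      simp only [PySem.Chars.replace.go]
      by_cases hc : c = d
      · subst hc
        simp [List.isPrefixOf, ih _ n (by simpa using h)]
      · have hp : [d].isPrefixOf (c :: t) = false := by
          simp [List.isPrefixOf, Ne.symm hc]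
        simp [hp, ih _ n (by simpa using h), hc]

theorem replace_single (d : Char) (s : List Char) :
    PySem.Chars.replace s [d] [] = s.filter (fun c => !(c == d)) := by
  rw [PySem.Chars.replace]
  simp [go_filter d s [] s.length le_rfl]

-- A's replace chain equals B's single filtered pass
theorem key (s : String) :
    (["|", "&", ";", "$", "`", "(", ")", "<", ">", "\"", "'"].foldl
      (fun s ch => PySem.Str.replace s ch "") s)
      = String.ofList (s.toList.filter (fun c => !(PySem.Set.contains pvDangerousSet c))) := by
  have hset : pvDangerousSet = "|&;$`()<>\"'".toList := by decide
  symm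
  rw [String.ofList_eq]
  simp only [List.foldl, PySem.Str.toList_replace]
  simp only [show ("" : String).toList = [] from rfl,
    show ("|" : String).toList = ['|'] from rfl,
    show ("&" : String).toList = ['&'] from rfl,
    show (";" : String).toList = [';'] from rfl,
    show ("$" : String).toList = ['$'] from rfl,
    show ("`" : String).toList = ['`'] from rfl,
    show ("(" : String).toList = ['('] from rfl,
    show (")" : String).toList = [')'] from rfl,
    show ("<" : String).toList = ['<'] from rfl,
    show (">" : String).toList = ['>'] from rfl,
    show ("\"" : String).toList = ['\"'] from rfl,
    show ("'" : String).toList = ['\''] from rfl,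
    replace_single, List.filter_filter]
  refine List.filter_congr (fun c _ => ?_)
  simp [hset, PySem.Set.contains, Bool.not_or, Bool.beq_eq_decide_eq,
    Bool.and_assoc, Bool.and_comm, Bool.and_left_comm]

-- ===== VERDICT (by name: the statement is the Claim_ definition above) =====
theorem sanitize_command_input_spec : Claim_equal_sanitize_command_input := by
  intro s _
  unfold Spec_sanitize_command_input sanitize_command_input sanitize_command_input_alt
  by_cases h : s = ""
  · simp [h]
  · simp only [if_neg h, key]
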